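-- pv_equiv track=rewrite | github.com/SamuelDovgin/Emoji-Pasta-Generator | Reddit_Bot_Scripts/bot_helper_functions.py | find_punct_ending_index
-- ===== SOURCE A (Python) =====
-- import string
--
-- def find_punct_ending_index(input_string):
--     punctuation_start = -1
--     punctuation_adj = False
--     for i in range(0,len(input_string)):
--         if input_string[i] in string.punctuation and input_string[i] != "\'":
--             if not punctuation_adj:
--                 punctuation_start = i
--             punctuation_adj = True
--         else:
--             punctuation_start = -1
--             punctuation_adj = False
--     if punctuation_adj:
--         return punctuation_start
--     else:
--         return None
-- ===== SOURCE B (Python) =====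
-- import string
--
-- def find_punct_ending_index(input_string):
--     punct = string.punctuation.replace("'", "")
--     stripped = input_string.rstrip(punct)
--     if len(stripped) == len(input_string):
--         return None
--     return len(stripped)
-- ===== Notes on version B (the rewrite author's own statement) =====
-- stated objective: simpler
-- what changed: Replaced the forward scan that tracks a run-start index and an adjacency flag by rstrip of the trailing punctuation run (apostrophe excluded) and length arithmetic: return len(stripped) if anything was stripped, else None.
import Mathlib
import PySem

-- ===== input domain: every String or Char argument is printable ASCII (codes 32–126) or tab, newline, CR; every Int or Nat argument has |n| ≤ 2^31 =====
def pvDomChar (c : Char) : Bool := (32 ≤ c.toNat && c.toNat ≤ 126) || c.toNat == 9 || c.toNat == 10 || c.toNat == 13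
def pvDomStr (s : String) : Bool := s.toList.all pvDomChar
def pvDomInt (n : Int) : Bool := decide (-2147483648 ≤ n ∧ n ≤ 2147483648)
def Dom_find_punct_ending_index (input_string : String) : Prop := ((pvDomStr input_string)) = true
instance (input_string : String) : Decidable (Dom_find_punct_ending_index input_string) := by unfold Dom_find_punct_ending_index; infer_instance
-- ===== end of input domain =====

-- B replaces A's forward index-tracking scan by stripping the trailing punctuation run and using length arithmetic (objective: simpler).

-- ===== PORT A =====
-- string.punctuation
def pvPunctA : List Char := "!\"#$%&'()*+,-./:;<=>?@[\\]^_`{|}~".toList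

-- the loop 'for i in range(0, len(input_string))' with state (punctuation_start, punctuation_adj)
def pvLoopA : List Char → Int → Int × Bool → Int × Bool
  | [], _, st => st
  | c :: rest, i, (start, adj) =>
    if pvPunctA.contains c && c != '\'' then
      pvLoopA rest (i + 1) ((if adj then start else i), true)
    else
      pvLoopA rest (i + 1) (-1, false)

def find_punct_ending_index (input_string : String) : Option Int :=
  let st := pvLoopA input_string.toList 0 (-1, false)
  if st.2 then some st.1 else none

-- ===== PORT B =====
-- string.punctuation.replace("'", "")
def pvPunctB : List Char := "!\"#$%&()*+,-./:;<=>?@[\\]^_`{|}~".toList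

-- input_string.rstrip(punct) ported as dropping the trailing run of pvPunctB chars
def find_punct_ending_index_alt (input_string : String) : Option Int :=
  let l := input_string.toList
  let stripped := (l.reverse.dropWhile (fun c => pvPunctB.contains c)).reverse
  if stripped.length = l.length then none else some (stripped.length : Int)

-- ===== PRECONDITION & SPEC =====
def Spec_find_punct_ending_index (input_string : String) (out : Option Int) : Prop := out = find_punct_ending_index_alt input_string
instance (input_string : String) (out : Option Int) : Decidable (Spec_find_punct_ending_index input_string out) := by unfold Spec_find_punct_ending_index; infer_instance

-- ===== CLAIM (what is proved, stated in full; the proofs are below) =====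
def Claim_equal_find_punct_ending_index : Prop := ∀ (input_string : String), Dom_find_punct_ending_index input_string → Spec_find_punct_ending_index input_string (find_punct_ending_index input_string)

-- ===== LEMMAS AND PROOFS =====

def pvIsP (c : Char) : Bool := pvPunctA.contains c && c != '\''

-- length of the trailing punctuation run
def pvT (l : List Char) : Nat := (l.reverse.takeWhile pvIsP).length

-- closed form of A's loop state
def pvSpec (l : List Char) (i s0 : Int) (b0 : Bool) : Int × Bool :=
  if pvT l = 0 then (if l.isEmpty then (s0, b0) else (-1, false))
  else if pvT l = l.length then ((if b0 then s0 else i), true)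
  else (i + ((l.length : Int) - (pvT l : Int)), true)

lemma pvP_eq (c : Char) : (pvPunctB.contains c) = pvIsP c := by
  by_cases hc : c = '\''
  · subst hc; decide
  · simp [pvIsP, pvPunctA, pvPunctB, hc]

lemma pvT_le (l : List Char) : pvT l ≤ l.length := by
  have h := (List.takeWhile_prefix (l := l.reverse) (p := pvIsP)).length_le
  simpa [pvT] using h

lemma pvTakeWhile_snoc (p : Char → Bool) (xs : List Char) (c : Char) :
    (xs ++ [c]).takeWhile p =
      if (xs.takeWhile p).length = xs.length then xs ++ [c].takeWhile p
      else xs.takeWhile p := by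
  induction xs with
  | nil => by_cases hc : p c <;> simp [List.takeWhile, hc]
  | cons a t ih =>
    by_cases ha : p a
    · by_cases h : (t.takeWhile p).length = t.length
      · simp [List.takeWhile_cons, ha, ih, h]
      · have hne : ¬((t.takeWhile p).length + 1 = t.length + 1) := by omega
        simp [ha, ih, h]
    · have hlt : (t.takeWhile p).length < t.length + 1 :=
        Nat.lt_succ_of_le (List.takeWhile_prefix p).length_le
      simp [ha]

lemma pvT_cons (c : Char) (rest : List Char) :
    pvT (c :: rest) =
      if pvT rest = rest.length then (if pvIsP c then pvT rest + 1 else pvT rest)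
      else pvT rest := by
  unfold pvT
  rw [List.reverse_cons, pvTakeWhile_snoc]
  by_cases h : ((rest.reverse.takeWhile pvIsP).length = rest.reverse.length)
  · have h' : (rest.reverse.takeWhile pvIsP).length = rest.length := by simpa using h
    by_cases hc : pvIsP c <;> simp [hc, h]
  · have h' : ¬((rest.reverse.takeWhile pvIsP).length = rest.length) := by simpa using h
    rw [if_neg h, if_neg h']

-- characterization of A's loop
lemma pvLoopA_spec (l : List Char) : ∀ (i s0 : Int) (b0 : Bool),
    pvLoopA l i (s0, b0) = pvSpec l i s0 b0 := by
  induction l with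
  | nil => intro i s0 b0; simp [pvLoopA, pvSpec, pvT]
  | cons c rest ih =>
    intro i s0 b0
    have htle := pvT_le rest
    have htc := pvT_cons c rest
    by_cases hc : pvIsP c
    · have hstep : pvLoopA (c :: rest) i (s0, b0)
          = pvLoopA rest (i + 1) ((if b0 then s0 else i), true) := by
        simp only [pvLoopA]
        rw [if_pos (show (pvPunctA.contains c && c != '\'') = true from hc)]
      rw [hstep, ih]
      by_cases hall : pvT rest = rest.length
      · have ht : pvT (c :: rest) = rest.length + 1 := by
          rw [htc, if_pos hall, if_pos hc, hall]
        by_cases h0 : pvT rest = 0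
        · have hre : rest = [] := List.eq_nil_of_length_eq_zero (hall ▸ h0)
          subst hre
          simp [pvSpec, pvT, hc]
        · have hne : ¬ rest.isEmpty := by
            cases rest with
            | nil => simp [pvT] at h0
            | cons a b => simp
          unfold pvSpec
          rw [if_neg h0, if_pos hall, if_neg (by omega : ¬ pvT (c :: rest) = 0),
            if_pos (by rw [ht]; simp : pvT (c :: rest) = (c :: rest).length)]
          simp
      · have hlt : pvT rest < rest.length := lt_of_le_of_ne htle hall
        have ht : pvT (c :: rest) = pvT rest := by rw [htc, if_neg hall]
        have hne : rest ≠ [] := by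
          intro h; subst h; simp at hlt
        by_cases h0 : pvT rest = 0
        · unfold pvSpec
          rw [if_pos h0, if_pos (ht.trans h0), if_neg (by simp [hne] : ¬ rest.isEmpty = true),
            if_neg (by simp : ¬ (c :: rest).isEmpty = true)]
        · unfold pvSpec
          rw [if_neg h0, if_neg hall, if_neg (by omega : ¬ pvT (c :: rest) = 0),
            if_neg (by rw [ht]; simp only [List.length_cons]; omega
              : ¬ pvT (c :: rest) = (c :: rest).length)]
          simp only [Prod.mk.injEq, ht, List.length_cons]
          constructor
          · push_cast; ring
          · trivial
    · have hstep : pvLoopA (c :: rest) i (s0, b0) = pvLoopA rest (i + 1) (-1, false) := by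
        simp only [pvLoopA]
        rw [if_neg (show ¬ (pvPunctA.contains c && c != '\'') = true by simpa [pvIsP] using hc)]
      rw [hstep, ih]
      have ht : pvT (c :: rest) = pvT rest := by
        rw [htc]; by_cases hall : pvT rest = rest.length <;> simp [hall, hc]
      by_cases h0 : pvT rest = 0
      · unfold pvSpec
        rw [if_pos h0, if_pos (ht.trans h0), if_neg (by simp : ¬ (c :: rest).isEmpty = true)]
        by_cases hre : rest.isEmpty <;> simp [hre]
      · have hn0 : 0 < rest.length := by omega
        unfold pvSpec
        rw [if_neg h0, if_neg (by omega : ¬ pvT (c :: rest) = 0),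
          if_neg (by rw [ht]; simp only [List.length_cons]; omega
            : ¬ pvT (c :: rest) = (c :: rest).length)]
        by_cases hall : pvT rest = rest.length
        · rw [if_pos hall]
          simp only [Prod.mk.injEq, ht, hall, List.length_cons, Bool.false_eq_true, if_false]
          constructor
          · push_cast; ring
          · trivial
        · rw [if_neg hall]
          simp only [Prod.mk.injEq, ht, List.length_cons]
          constructor
          · push_cast; ring
          · trivial

lemma pvDrop_len (l : List Char) :
    ((l.reverse.dropWhile (fun c => pvPunctB.contains c)).reverse).length
      = l.length - pvT l := by
  have hp : (fun c => pvPunctB.contains c) = pvIsP := funext pvP_eq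
  rw [hp]
  have h := List.takeWhile_append_dropWhile (p := pvIsP) (l := l.reverse)
  have h2 := congrArg List.length h
  rw [List.length_append, List.length_reverse] at h2
  simp only [List.length_reverse, pvT]
  omega

-- ===== VERDICT (by name: the statement is the Claim_ definition above) =====
theorem find_punct_ending_index_spec : Claim_equal_find_punct_ending_index := by
  intro s _
  unfold Spec_find_punct_ending_index find_punct_ending_index find_punct_ending_index_alt
  simp only [pvLoopA_spec, pvDrop_len]
  have htle := pvT_le s.toList
  by_cases h0 : pvT s.toList = 0
  · by_cases hre : s.toList.isEmpty <;> simp [pvSpec, h0, hre]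
  · by_cases hall : pvT s.toList = s.toList.length
    · have hsub : ¬ (s.toList.length - pvT s.toList = s.toList.length) := by omega
      unfold pvSpec
      rw [if_neg h0, if_pos hall, if_neg hsub]
      simp [hall]
    · have hsub : ¬ (s.toList.length - pvT s.toList = s.toList.length) := by omega
      unfold pvSpec
      rw [if_neg h0, if_neg hall, if_neg hsub]
      have hs : s.toList.length = s.length := by simp
      simp
      all_goals omega
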